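-- pv_equiv track=rewrite | github.com/denisjng/html_view | app.py | extract_lines_with_issues
-- ===== SOURCE A (Python) =====
-- def extract_lines_with_issues(html_content, issues, details):
--     """
--     Extracts lines from the HTML that correspond to detected issues.
--     Returns a list of lines, one per issue, in the same order as the issues list.
--     """
--     lines = html_content.splitlines()
--     result = []
--
--     # Create a mapping of issues to their specific patterns
--     issue_patterns = {
--         'script_tag': ['<script', 'script'],
--         'iframe_tag': ['<iframe'],
--         'inline_event_handler': ['onclick', 'onload', 'onerror', 'onmouseover', 'onchange'],
--         'javascript_url': ['javascript:'],
--         'object_tag': ['<object'],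
--         'embed_tag': ['<embed'],
--         'applet_tag': ['<applet'],
--         'form_external': ['<form'],
--         'meta_refresh': ['<meta', 'refresh'],
--         'html_import': ['<link', 'import'],
--         'data_url': ['data:'],
--         'style_tag': ['<style'],
--         'inline_style': ['style='],
--         'base_tag': ['<base'],
--         'svg_script_or_foreignObject': ['<svg', '<script', '<foreignobject'],
--         'template_tag': ['<template'],
--         'suspicious_comment': ['exec', 'base64', '[if', '#inclu']
--     }
--
--     # For each issue, find the matching line(s)
--     for issue, detail in zip(issues, details):
--         matching_lines = []
--         # Check each line for a match with the current issue
--         for idx, line in enumerate(lines, 1):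
--             l = line.lower()
--             if issue in issue_patterns:
--                 patterns = issue_patterns[issue]
--                 if any(pattern in l for pattern in patterns):
--                     matching_lines.append(f"Line {idx}: {line.strip()}")
--         # If no matching lines found, use the detail as fallback
--         if not matching_lines:
--             matching_line = f"Issue detected: {detail}"
--         else:
--             # For suspicious comments, show all matching lines
--             if issue == 'suspicious_comment':
--                 matching_line = '\n'.join(matching_lines)
--             else:
--                 # For other issues, show only the first matching line
--                 matching_line = matching_lines[0]
--         result.append(matching_line)
--
--     return result
--     return result
-- ===== SOURCE B (Python) =====
-- def extract_lines_with_issues(html_content, issues, details):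
--     """
--     One pass over the HTML lines builds an index mapping each issue type to
--     the formatted lines matching its patterns; a second pass over the issues
--     emits the result from that index.
--     """
--     issue_patterns = {
--         'script_tag': ['<script', 'script'],
--         'iframe_tag': ['<iframe'],
--         'inline_event_handler': ['onclick', 'onload', 'onerror', 'onmouseover', 'onchange'],
--         'javascript_url': ['javascript:'],
--         'object_tag': ['<object'],
--         'embed_tag': ['<embed'],
--         'applet_tag': ['<applet'],
--         'form_external': ['<form'],
--         'meta_refresh': ['<meta', 'refresh'],
--         'html_import': ['<link', 'import'],
--         'data_url': ['data:'],
--         'style_tag': ['<style'],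
--         'inline_style': ['style='],
--         'base_tag': ['<base'],
--         'svg_script_or_foreignObject': ['<svg', '<script', '<foreignobject'],
--         'template_tag': ['<template'],
--         'suspicious_comment': ['exec', 'base64', '[if', '#inclu']
--     }
--     index = {}
--     for idx, line in enumerate(html_content.splitlines(), 1):
--         l = line.lower()
--         entry = f"Line {idx}: {line.strip()}"
--         for issue, patterns in issue_patterns.items():
--             if any(p in l for p in patterns):
--                 index[issue] = index.get(issue, []) + [entry]
--     result = []
--     for issue, detail in zip(issues, details):
--         hits = index.get(issue, [])
--         if not hits:
--             result.append(f"Issue detected: {detail}")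
--         elif issue == 'suspicious_comment':
--             result.append('\n'.join(hits))
--         else:
--             result.append(hits[0])
--     return result
-- ===== Notes on version B (the rewrite author's own statement) =====
-- stated objective: faster
-- what changed: Instead of rescanning (and re-lowercasing) every HTML line for each requested issue, B scans the lines once, building an index from issue type to its formatted matching lines, and then answers each (issue, detail) pair by a dictionary lookup (join all for 'suspicious_comment', first hit otherwise, detail fallback when empty).
import Mathlib
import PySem

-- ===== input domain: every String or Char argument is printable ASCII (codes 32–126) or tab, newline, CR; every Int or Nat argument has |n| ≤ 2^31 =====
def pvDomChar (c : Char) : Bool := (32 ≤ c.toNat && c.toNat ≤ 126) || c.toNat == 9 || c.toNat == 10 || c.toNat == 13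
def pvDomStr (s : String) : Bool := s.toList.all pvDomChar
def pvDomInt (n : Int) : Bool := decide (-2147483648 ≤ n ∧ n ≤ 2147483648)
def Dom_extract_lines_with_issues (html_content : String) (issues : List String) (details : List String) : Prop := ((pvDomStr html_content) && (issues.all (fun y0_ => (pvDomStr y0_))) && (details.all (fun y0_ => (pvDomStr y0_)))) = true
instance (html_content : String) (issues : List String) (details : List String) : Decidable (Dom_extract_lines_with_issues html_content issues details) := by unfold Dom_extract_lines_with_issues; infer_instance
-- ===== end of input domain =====

-- B replaces A's per-issue rescan of every line by ONE pass over the lines building an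
-- index (issue type -> formatted matching lines), then answers each issue by lookup
-- (objective: faster, measured).

-- shared data: the literal issue_patterns table, in source order (both Pythons carry the same literal)
def pvIssuePatterns : List (String × List String) := [
  ("script_tag", ["<script", "script"]),
  ("iframe_tag", ["<iframe"]),
  ("inline_event_handler", ["onclick", "onload", "onerror", "onmouseover", "onchange"]),
  ("javascript_url", ["javascript:"]),
  ("object_tag", ["<object"]),
  ("embed_tag", ["<embed"]),
  ("applet_tag", ["<applet"]),
  ("form_external", ["<form"]),
  ("meta_refresh", ["<meta", "refresh"]),
  ("html_import", ["<link", "import"]),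
  ("data_url", ["data:"]),
  ("style_tag", ["<style"]),
  ("inline_style", ["style="]),
  ("base_tag", ["<base"]),
  ("svg_script_or_foreignObject", ["<svg", "<script", "<foreignobject"]),
  ("template_tag", ["<template"]),
  ("suspicious_comment", ["exec", "base64", "[if", "#inclu"])]

-- ===== PORT A =====
def extract_lines_with_issues (html_content : String) (issues : List String) (details : List String) : List String :=
  let lines := PySem.Str.splitlines html_content
  let issue_patterns : PySem.Dict String (List String) := PySem.Dict.mk pvIssuePatterns
  (issues.zip details).foldl (fun result pr =>
    let issue := pr.1
    let detail := pr.2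
    let matching_lines :=
      (PySem.List.enumerate lines 1).foldl (fun acc q =>
        let l := PySem.Str.lower q.2
        if issue_patterns.contains issue then
          let patterns := (issue_patterns.get? issue).getD []
          if patterns.any (fun pattern => PySem.Str.isIn pattern l) then
            acc ++ [PySem.Str.join "" ["Line ", PySem.Int.toStr q.1, ": ", PySem.Str.strip q.2]]
          else acc
        else acc) []
    let matching_line :=
      if matching_lines = [] then PySem.Str.join "" ["Issue detected: ", detail]
      else if issue = "suspicious_comment" then PySem.Str.join "\n" matching_lines
      else matching_lines.headD ""
    result ++ [matching_line]) []

-- ===== PORT B =====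
def extract_lines_with_issues_alt (html_content : String) (issues : List String) (details : List String) : List String :=
  let index : PySem.Dict String (List String) :=
    (PySem.List.enumerate (PySem.Str.splitlines html_content) 1).foldl (fun d q =>
      let l := PySem.Str.lower q.2
      let entry := PySem.Str.join "" ["Line ", PySem.Int.toStr q.1, ": ", PySem.Str.strip q.2]
      pvIssuePatterns.foldl (fun d pr =>
        if pr.2.any (fun p => PySem.Str.isIn p l) then d.modify pr.1 [] (· ++ [entry]) else d) d)
      PySem.Dict.empty
  (issues.zip details).map (fun pr =>
    let hits := index.getD pr.1 []
    if hits = [] then PySem.Str.join "" ["Issue detected: ", pr.2]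
    else if pr.1 = "suspicious_comment" then PySem.Str.join "\n" hits
    else hits.headD "")

-- ===== PRECONDITION & SPEC =====
def Spec_extract_lines_with_issues (html_content : String) (issues : List String) (details : List String) (out : List String) : Prop := out = extract_lines_with_issues_alt html_content issues details
instance (html_content : String) (issues : List String) (details : List String) (out : List String) : Decidable (Spec_extract_lines_with_issues html_content issues details out) := by unfold Spec_extract_lines_with_issues; infer_instance

-- ===== CLAIM (what is proved, stated in full; the proofs are below) =====
def Claim_equal_extract_lines_with_issues : Prop := ∀ (html_content : String) (issues : List String) (details : List String), Dom_extract_lines_with_issues html_content issues details → Spec_extract_lines_with_issues html_content issues details (extract_lines_with_issues html_content issues details)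

-- ===== LEMMAS AND PROOFS =====

-- no table entry has key `issue` ⇒ the table-wide any is false
theorem pv_any_eq_false_of_not_mem {tbl : List (String × List String)} {issue : String}
    (h : issue ∉ tbl.map Prod.fst) (m : List String → Bool) :
    tbl.any (fun p => p.1 == issue && m p.2) = false := by
  simp only [List.any_eq_false]
  intro p hp
  simp only [Bool.and_eq_true, beq_iff_eq]
  rintro ⟨rfl, -⟩
  exact h (List.mem_map.mpr ⟨p, hp, rfl⟩)

-- A's membership-guarded dict lookup equals one scan of the table (keys distinct)
theorem pv_condA_eq (tbl : List (String × List String)) (hnd : (tbl.map Prod.fst).Nodup)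
    (issue : String) (m : String → Bool) :
    ((PySem.Dict.mk tbl).contains issue && (((PySem.Dict.mk tbl).get? issue).getD []).any m)
      = tbl.any (fun p => p.1 == issue && p.2.any m) := by
  induction tbl with
  | nil => simp [PySem.Dict.contains_mk]
  | cons hd tl ih =>
    obtain ⟨k, pats⟩ := hd
    simp only [List.map_cons, List.nodup_cons] at hnd
    rw [List.any_cons]
    by_cases hk : k = issue
    · subst hk
      rw [pv_any_eq_false_of_not_mem hnd.1 (fun pats => pats.any m)]
      simp [PySem.Dict.contains_mk, PySem.Dict.get?_mk_cons]
    · have hbeq : (k == issue) = false := by simp [hk]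
      rw [← ih hnd.2]
      simp [PySem.Dict.contains_mk, PySem.Dict.get?_mk_cons, hbeq]

-- one line's pass over the table changes getD issue only by (possibly) appending the entry
theorem pv_inner (tbl : List (String × List String)) (hnd : (tbl.map Prod.fst).Nodup)
    (d : PySem.Dict String (List String)) (e issue : String) (m : List String → Bool) :
    (tbl.foldl (fun d pr => if m pr.2 then d.modify pr.1 [] (· ++ [e]) else d) d).getD issue []
      = d.getD issue [] ++ (if tbl.any (fun p => p.1 == issue && m p.2) then [e] else []) := by
  induction tbl generalizing d with
  | nil => simp
  | cons hd tl ih =>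
    obtain ⟨k, pats⟩ := hd
    simp only [List.map_cons, List.nodup_cons] at hnd
    rw [List.foldl_cons, List.any_cons, ih hnd.2]
    by_cases hk : k = issue
    · subst hk
      rw [pv_any_eq_false_of_not_mem hnd.1 m]
      cases hmp : m pats
      · simp
      · simp [PySem.Dict.getD_modify]
    · have hrw : tl.any (fun p => p.1 == issue && m p.2)
          = ((k == issue && m pats) || tl.any (fun p => p.1 == issue && m p.2)) := by
        simp [show (k == issue) = false by simp [hk]]
      rw [← hrw]
      cases hmp : m pats <;>
        simp [PySem.Dict.getD_modify, Ne.symm hk]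

theorem pvTableKeysNodup : (pvIssuePatterns.map Prod.fst).Nodup := by decide

-- the whole index-building pass: getD issue collects exactly the matching lines, in order
theorem pv_outer (L : List (Int × String)) (d : PySem.Dict String (List String)) (issue : String) :
    (L.foldl (fun d q =>
        pvIssuePatterns.foldl (fun d pr =>
          if pr.2.any (fun p => PySem.Str.isIn p (PySem.Str.lower q.2)) then
            d.modify pr.1 [] (· ++ [PySem.Str.join "" ["Line ", PySem.Int.toStr q.1, ": ", PySem.Str.strip q.2]])
          else d) d) d).getD issue []
      = d.getD issue []
        ++ (L.filter (fun q => pvIssuePatterns.any (fun p => p.1 == issue && p.2.any (fun pat => PySem.Str.isIn pat (PySem.Str.lower q.2))))).map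
             (fun q => PySem.Str.join "" ["Line ", PySem.Int.toStr q.1, ": ", PySem.Str.strip q.2]) := by
  induction L generalizing d with
  | nil => simp
  | cons q L ih =>
    rw [List.foldl_cons, ih, pv_inner pvIssuePatterns pvTableKeysNodup d _ issue
      (fun pats => pats.any (fun p => PySem.Str.isIn p (PySem.Str.lower q.2)))]
    rw [List.filter_cons]
    cases hq : pvIssuePatterns.any (fun p => p.1 == issue && p.2.any (fun pat => PySem.Str.isIn pat (PySem.Str.lower q.2))) <;>
      simp

-- ===== VERDICT (by name: the statement is the Claim_ definition above) =====
theorem extract_lines_with_issues_spec : Claim_equal_extract_lines_with_issues := by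
  unfold Claim_equal_extract_lines_with_issues
  intro html_content issues details _
  unfold Spec_extract_lines_with_issues extract_lines_with_issues extract_lines_with_issues_alt
  rw [PySem.List.foldl_append_singleton_eq_map, List.nil_append]
  apply List.map_congr_left
  intro pr _
  have hstep : ∀ (acc : List String) (q : Int × String),
      (if (PySem.Dict.mk pvIssuePatterns).contains pr.1 then
        if ((((PySem.Dict.mk pvIssuePatterns).get? pr.1).getD []).any
              (fun pattern => PySem.Str.isIn pattern (PySem.Str.lower q.2))) then
          acc ++ [PySem.Str.join "" ["Line ", PySem.Int.toStr q.1, ": ", PySem.Str.strip q.2]]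
        else acc
      else acc)
      = (if pvIssuePatterns.any (fun p => p.1 == pr.1 && p.2.any (fun pat => PySem.Str.isIn pat (PySem.Str.lower q.2))) then
          acc ++ [PySem.Str.join "" ["Line ", PySem.Int.toStr q.1, ": ", PySem.Str.strip q.2]]
        else acc) := by
    intro acc q
    rw [← pv_condA_eq pvIssuePatterns pvTableKeysNodup pr.1
      (fun pattern => PySem.Str.isIn pattern (PySem.Str.lower q.2))]
    cases hc : (PySem.Dict.mk pvIssuePatterns).contains pr.1 <;>
      cases han : (((PySem.Dict.mk pvIssuePatterns).get? pr.1).getD []).any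
        (fun pattern => PySem.Str.isIn pattern (PySem.Str.lower q.2)) <;>
      simp
  have hmatch :
      (PySem.List.enumerate (PySem.Str.splitlines html_content) 1).foldl (fun acc q =>
          if (PySem.Dict.mk pvIssuePatterns).contains pr.1 then
            if ((((PySem.Dict.mk pvIssuePatterns).get? pr.1).getD []).any
                  (fun pattern => PySem.Str.isIn pattern (PySem.Str.lower q.2))) then
              acc ++ [PySem.Str.join "" ["Line ", PySem.Int.toStr q.1, ": ", PySem.Str.strip q.2]]
            else acc
          else acc) []
        = ((PySem.List.enumerate (PySem.Str.splitlines html_content) 1).foldl (fun d q =>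
            pvIssuePatterns.foldl (fun d pr' =>
              if pr'.2.any (fun p => PySem.Str.isIn p (PySem.Str.lower q.2)) then
                d.modify pr'.1 [] (· ++ [PySem.Str.join "" ["Line ", PySem.Int.toStr q.1, ": ", PySem.Str.strip q.2]])
              else d) d) PySem.Dict.empty).getD pr.1 [] := by
    rw [pv_outer, PySem.Dict.getD_empty, List.nil_append]
    calc (PySem.List.enumerate (PySem.Str.splitlines html_content) 1).foldl (fun acc q =>
          if (PySem.Dict.mk pvIssuePatterns).contains pr.1 then
            if ((((PySem.Dict.mk pvIssuePatterns).get? pr.1).getD []).any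
                  (fun pattern => PySem.Str.isIn pattern (PySem.Str.lower q.2))) then
              acc ++ [PySem.Str.join "" ["Line ", PySem.Int.toStr q.1, ": ", PySem.Str.strip q.2]]
            else acc
          else acc) []
        = (PySem.List.enumerate (PySem.Str.splitlines html_content) 1).foldl (fun acc (q : Int × String) =>
            if pvIssuePatterns.any (fun p => p.1 == pr.1 && p.2.any (fun pat => PySem.Str.isIn pat (PySem.Str.lower q.2))) then
              acc ++ [PySem.Str.join "" ["Line ", PySem.Int.toStr q.1, ": ", PySem.Str.strip q.2]]
            else acc) [] := by
              apply PySem.List.foldl_congr_mem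
              intro acc q _
              exact hstep acc q
      _ = _ := by rw [PySem.List.foldl_append_if, List.nil_append]
  simp only [hmatch]
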